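-- pv_equiv track=rewrite | github.com/Myoko1110/UtazonWeb | util/ItemHelper.py | generate_range
-- ===== SOURCE A (Python) =====
-- def generate_range(upper_limit, specified_number):
--     if upper_limit <= 0:
--         return ()
--
--     # 範囲の中央値を計算
--     mid = specified_number - 1  # 0-based
--     half_length = 2  # 範囲の半分の長さを設定
--
--     # 中央値周りの範囲を計算
--     start = max(mid - half_length, 0)
--     end = min(mid + half_length + 1, upper_limit)
--
--     # 範囲が5個になるように調整
--     while end - start < 5 and (start > 0 or end < upper_limit):
--         if start > 0:
--             start -= 1
--         elif end < upper_limit: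
--             end += 1
--
--     # 1-based
--     start += 1
--     end += 1
--
--     return range(start, end)
-- ===== SOURCE B (Python) =====
-- def generate_range(upper_limit, specified_number):
--     if upper_limit <= 0:
--         return ()
--     length = min(5, upper_limit)
--     start = max(0, min(specified_number - 3, upper_limit - length))
--     return range(start + 1, start + length + 1)
-- ===== Notes on version B (the rewrite author's own statement) =====
-- stated objective: simpler
-- what changed: Replaces the expand-by-one while loop with a closed-form clamp: window length L = min(5, upper_limit) and start = max(0, min(specified_number - 3, upper_limit - L)).
import Mathlib
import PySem

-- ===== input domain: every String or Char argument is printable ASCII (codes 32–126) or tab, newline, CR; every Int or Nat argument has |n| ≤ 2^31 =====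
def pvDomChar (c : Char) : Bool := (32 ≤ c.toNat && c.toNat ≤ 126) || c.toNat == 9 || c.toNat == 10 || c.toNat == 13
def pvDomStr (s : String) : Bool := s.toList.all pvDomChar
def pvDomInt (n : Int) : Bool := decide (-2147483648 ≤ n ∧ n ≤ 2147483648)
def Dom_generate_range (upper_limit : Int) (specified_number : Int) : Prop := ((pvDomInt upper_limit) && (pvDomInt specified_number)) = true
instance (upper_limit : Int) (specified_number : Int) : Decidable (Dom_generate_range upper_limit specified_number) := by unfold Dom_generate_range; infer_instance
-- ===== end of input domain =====

-- B replaces A's expand-by-one while loop with a direct closed-form clamp of the window start (objective: simpler).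

-- ===== PORT A =====
-- A's while loop: decrement start while possible, else increment end, until the
-- window reaches length 5 or covers [0, upper_limit].
def generateRangeLoopA (upper start «end» : Int) : Int × Int :=
  if «end» - start < 5 ∧ (start > 0 ∨ «end» < upper) then
    if start > 0 then generateRangeLoopA upper (start - 1) «end»
    else generateRangeLoopA upper start («end» + 1)
  else (start, «end»)
termination_by (start.toNat + (upper - «end»).toNat)
decreasing_by
  · omega
  · omega

def generate_range (upper_limit : Int) (specified_number : Int) : List Int :=
  if upper_limit ≤ 0 then []
  else
    let mid := specified_number - 1
    let half_length : Int := 2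
    let start := max (mid - half_length) 0
    let «end» := min (mid + half_length + 1) upper_limit
    let p := generateRangeLoopA upper_limit start «end»
    PySem.List.pyRange (p.1 + 1) (p.2 + 1) 1

-- ===== PORT B =====
def generate_range_alt (upper_limit : Int) (specified_number : Int) : List Int :=
  if upper_limit ≤ 0 then []
  else
    let length := min 5 upper_limit
    let start := max 0 (min (specified_number - 3) (upper_limit - length))
    PySem.List.pyRange (start + 1) (start + length + 1) 1

-- ===== PRECONDITION & SPEC =====
def Spec_generate_range (upper_limit : Int) (specified_number : Int) (out : List Int) : Prop := out = generate_range_alt upper_limit specified_number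
instance (upper_limit : Int) (specified_number : Int) (out : List Int) : Decidable (Spec_generate_range upper_limit specified_number out) := by unfold Spec_generate_range; infer_instance

-- ===== CLAIM (what is proved, stated in full; the proofs are below) =====
def Claim_equal_generate_range : Prop := ∀ (upper_limit : Int) (specified_number : Int), Dom_generate_range upper_limit specified_number → Spec_generate_range upper_limit specified_number (generate_range upper_limit specified_number)

-- ===== LEMMAS AND PROOFS =====

-- Closed form of A's adjustment loop (valid for 0 ≤ start and end ≤ upper).
theorem generateRangeLoopA_closed (upper start «end» : Int)
    (h0 : 0 ≤ start) (h1 : «end» ≤ upper) :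
    generateRangeLoopA upper start «end» =
      (max 0 (min start («end» - 5)),
       if 5 ≤ «end» - max 0 (min start («end» - 5)) then «end»
       else min upper (max 0 (min start («end» - 5)) + 5)) := by
  revert h0 h1
  induction start, «end» using generateRangeLoopA.induct upper with
  | case1 start e hcond hpos ih =>
      intro h0 h1
      rw [generateRangeLoopA, if_pos hcond, if_pos hpos, ih (by omega) h1]
      refine Prod.ext ?_ ?_ <;> simp only <;> omega
  | case2 start e hcond hpos ih =>
      intro h0 h1
      rw [generateRangeLoopA, if_pos hcond, if_neg hpos, ih h0 (by omega)]
      refine Prod.ext ?_ ?_ <;> simp only <;> omega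
  | case3 start e hcond =>
      intro h0 h1
      rw [generateRangeLoopA, if_neg hcond]
      refine Prod.ext ?_ ?_ <;> simp only <;> omega

-- ===== VERDICT (by name: the statement is the Claim_ definition above) =====
theorem generate_range_spec : Claim_equal_generate_range := by
  intro u s _
  unfold Spec_generate_range generate_range generate_range_alt
  by_cases hu : u ≤ 0
  · simp [hu]
  · simp only [if_neg hu]
    rw [generateRangeLoopA_closed u (max (s - 1 - 2) 0) (min (s - 1 + 2 + 1) u)
          (by omega) (by omega)]
    have h1 : (max 0 (min (max (s - 1 - 2) 0) (min (s - 1 + 2 + 1) u - 5))) + 1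
        = max 0 (min (s - 3) (u - min 5 u)) + 1 := by omega
    have h2 : (if 5 ≤ min (s - 1 + 2 + 1) u -
          max 0 (min (max (s - 1 - 2) 0) (min (s - 1 + 2 + 1) u - 5))
        then min (s - 1 + 2 + 1) u
        else min u (max 0 (min (max (s - 1 - 2) 0) (min (s - 1 + 2 + 1) u - 5)) + 5)) + 1
        = max 0 (min (s - 3) (u - min 5 u)) + min 5 u + 1 := by
      split_ifs <;> omega
    rw [h1, h2]
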